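-- pv_equiv track=rewrite | github.com/jiangxinyang227/Kaggle-Data-Science | IMDB/imdb_classifier.py | convert_text_to_token
-- ===== SOURCE A (Python) =====
-- SENTENCE_LIMIT_SIZE = 120
--
-- def convert_text_to_token(sentence, word_to_token_map, limit_size=SENTENCE_LIMIT_SIZE):
--     """
--     根据单词-编码映射表将单个句子转化为token
--     return: 句子转换为token后的列表
--     """
--     # 获取unknown单词和pad的token
--     unk_id = word_to_token_map["<unk>"]
--     pad_id = word_to_token_map["<pad>"]
--
--     # 对句子进行token转换，对于未在词典中出现过的词用unk的token填充
--     tokens = [word_to_token_map.get(word, unk_id) for word in sentence.lower().split()]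
--
--     # Pad
--     if len(tokens) < limit_size:
--         # 选择填充0，其实就是对应了"<pad>"
--         tokens.extend([0] * (limit_size - len(tokens)))
--     # Trunc
--     else:
--         tokens = tokens[:limit_size]
--
--     return tokens
-- ===== SOURCE B (Python) =====
-- SENTENCE_LIMIT_SIZE = 120
--
-- def convert_text_to_token(sentence, word_to_token_map, limit_size=SENTENCE_LIMIT_SIZE):
--     unk_id = word_to_token_map["<unk>"]
--     # Pre-allocated fixed-size buffer: short sentences keep the trailing 0 padding,
--     # long sentences stop early via break -- no separate pad/trunc branch.
--     tokens = [0] * limit_size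
--     for i, word in enumerate(sentence.lower().split()):
--         if i >= limit_size:
--             break
--         tokens[i] = word_to_token_map.get(word, unk_id)
--     return tokens
-- ===== Notes on version B (the rewrite author's own statement) =====
-- stated objective: simpler
-- what changed: B writes tokens into a pre-allocated [0]*limit_size buffer with an early break, instead of A's build-full-token-list-then-pad-or-truncate branching; B also never touches the unused '<pad>' entry.
-- outside the precondition, e.g. on convert_text_to_token('a b c', {'<unk>': 1, '<pad>': 0}, -1): A returns [1, 1], B returns []
import Mathlib
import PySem

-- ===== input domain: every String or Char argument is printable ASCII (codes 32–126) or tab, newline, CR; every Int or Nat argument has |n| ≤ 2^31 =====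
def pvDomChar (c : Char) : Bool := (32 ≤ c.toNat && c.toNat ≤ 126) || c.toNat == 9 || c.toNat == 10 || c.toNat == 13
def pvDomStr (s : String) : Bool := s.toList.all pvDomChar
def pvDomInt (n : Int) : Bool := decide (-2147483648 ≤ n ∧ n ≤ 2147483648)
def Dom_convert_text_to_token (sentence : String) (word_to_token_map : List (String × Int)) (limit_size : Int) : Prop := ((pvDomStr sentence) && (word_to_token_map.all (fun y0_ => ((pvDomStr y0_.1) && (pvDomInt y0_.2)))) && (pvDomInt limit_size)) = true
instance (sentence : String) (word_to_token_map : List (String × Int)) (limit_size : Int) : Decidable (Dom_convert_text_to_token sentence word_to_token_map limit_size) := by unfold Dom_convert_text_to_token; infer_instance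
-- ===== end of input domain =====

-- B fills a pre-allocated [0]*limit_size buffer with an early break instead of A's
-- build-then-pad-or-truncate branching (and never reads the unused "<pad>" entry); simpler decomposition, same results.


-- ===== PORT A =====
-- word_to_token_map["<unk>"] / ["<pad>"] raise KeyError when absent: the .getD 0 default is
-- never reached under Pre_ (which requires both keys present).
def convert_text_to_token (sentence : String) (word_to_token_map : List (String × Int)) (limit_size : Int) : List Int :=
  let unk_id : Int := (word_to_token_map.lookup "<unk>").getD 0
  let _pad_id : Int := (word_to_token_map.lookup "<pad>").getD 0
  let tokens : List Int :=
    (PySem.Str.split₀ (PySem.Str.lower sentence)).map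
      (fun word => (word_to_token_map.lookup word).getD unk_id)
  if (tokens.length : Int) < limit_size then
    tokens ++ List.replicate (limit_size - (tokens.length : Int)).toNat 0
  else
    PySem.List.slice tokens none (some limit_size)

-- ===== PORT B =====
-- Source B's 'break' at i >= limit_size is ported as a skipping fold: once some index reaches
-- limit_size every later index does too, so skipping equals breaking.
def convert_text_to_token_alt (sentence : String) (word_to_token_map : List (String × Int)) (limit_size : Int) : List Int :=
  let unk_id : Int := (word_to_token_map.lookup "<unk>").getD 0
  (PySem.List.enumerate (PySem.Str.split₀ (PySem.Str.lower sentence)) 0).foldl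
    (fun tokens iw =>
      if iw.1 ≥ limit_size then tokens
      else tokens.set iw.1.toNat ((word_to_token_map.lookup iw.2).getD unk_id))
    (List.replicate limit_size.toNat 0)

-- ===== PRECONDITION & SPEC =====
-- Pre_ excludes (a) maps without a "<unk>" or "<pad>" key, where A raises KeyError, and
-- (b) negative limit_size on sentences with more than -limit_size words — a negative length is
-- outside the function's fixed-length contract, no behaviour is specified there, and A's negative
-- slice and B's empty buffer are equally defensible answers to a nonsensical length
-- (on ("a b c", {"<unk>":1,"<pad>":0}, -1) A returns [1, 1] and B returns []).
def Pre_convert_text_to_token (sentence : String) (word_to_token_map : List (String × Int)) (limit_size : Int) : Prop :=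
  (0 ≤ limit_size ∨ ((PySem.Str.split₀ (PySem.Str.lower sentence)).length : Int) ≤ -limit_size)
    ∧ (word_to_token_map.lookup "<unk>").isSome ∧ (word_to_token_map.lookup "<pad>").isSome
instance (sentence : String) (word_to_token_map : List (String × Int)) (limit_size : Int) : Decidable (Pre_convert_text_to_token sentence word_to_token_map limit_size) := by unfold Pre_convert_text_to_token; infer_instance

def pvWitness_convert_text_to_token : String × (List (String × Int)) × Int :=
  ("hi There x", [("<unk>", 1), ("<pad>", 0), ("there", 7)], 5)

def Spec_convert_text_to_token (sentence : String) (word_to_token_map : List (String × Int)) (limit_size : Int) (out : List Int) : Prop := out = convert_text_to_token_alt sentence word_to_token_map limit_size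
instance (sentence : String) (word_to_token_map : List (String × Int)) (limit_size : Int) (out : List Int) : Decidable (Spec_convert_text_to_token sentence word_to_token_map limit_size out) := by unfold Spec_convert_text_to_token; infer_instance

-- ===== CLAIM (what is proved, stated in full; the proofs are below) =====
def Claim_equal_convert_text_to_token : Prop := ∀ (sentence : String) (word_to_token_map : List (String × Int)) (limit_size : Int), Dom_convert_text_to_token sentence word_to_token_map limit_size → Pre_convert_text_to_token sentence word_to_token_map limit_size → Spec_convert_text_to_token sentence word_to_token_map limit_size (convert_text_to_token sentence word_to_token_map limit_size)


-- ===== LEMMAS AND PROOFS =====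

-- B's buffer-filling fold: starting at index k over a buffer of length n, it overwrites
-- positions k .. min n (k + ws.length) - 1 with the mapped words and leaves the rest.
theorem pv_foldB (f : String → Int) (n : Nat) (ws : List String) : ∀ (k : Nat) (buf : List Int), buf.length = n →
    (PySem.List.enumerate ws (k:Int)).foldl
      (fun b iw => if iw.1 ≥ (n:Int) then b else b.set iw.1.toNat (f iw.2)) buf
    = buf.take k ++ (ws.map f).take (n - k) ++ buf.drop (min n (k + ws.length)) := by
  induction ws with
  | nil =>
    intro k buf hb
    simp only [PySem.List.enumerate, List.foldl_nil, List.map_nil, List.take_nil,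
      List.append_nil, List.length_nil, Nat.add_zero]
    by_cases h : k ≤ n
    · rw [min_eq_right (by omega)]
      exact (List.take_append_drop k buf).symm
    · rw [min_eq_left (by omega), List.take_of_length_le (by omega),
        List.drop_of_length_le (by omega), List.append_nil]
  | cons w ws ih =>
    intro k buf hb
    rw [PySem.List.enumerate_cons]
    simp only [List.foldl_cons]
    by_cases h : n ≤ k
    · rw [if_pos (by simp; exact_mod_cast h)]
      have := ih (k+1) buf hb
      push_cast at this
      rw [this, Nat.sub_eq_zero_of_le (by omega : n ≤ k+1), Nat.sub_eq_zero_of_le (by omega : n ≤ k),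
        List.length_cons, min_eq_left (by omega), min_eq_left (by omega),
        List.take_of_length_le (by omega : buf.length ≤ k+1),
        List.take_of_length_le (by omega : buf.length ≤ k),
        List.drop_of_length_le (by omega : buf.length ≤ n)]
      simp
    · have hk : k < n := by omega
      rw [if_neg (by simp; exact_mod_cast hk)]
      have := ih (k+1) (buf.set k (f w)) (by simp [hb])
      push_cast at this
      simp only [Int.toNat_natCast] at this ⊢
      rw [this]
      have hset : buf.set k (f w) = buf.take k ++ f w :: buf.drop (k+1) := by
        rw [List.set_eq_take_append_cons_drop]
        simp [hb, hk]
      have hnk : n - k = (n - (k+1)) + 1 := by omega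
      rw [hset, List.map_cons, hnk, List.take_succ_cons, List.length_cons]
      have hlen : (buf.take k).length = k := by simp [hb]; omega
      have h1 : ((buf.take k ++ f w :: buf.drop (k+1)).take (k+1))
          = buf.take k ++ [f w] := by
        rw [List.take_append, hlen]
        simp
      have h2 : ∀ m : Nat, k + 1 ≤ m →
          (buf.take k ++ f w :: buf.drop (k+1)).drop m = buf.drop m := by
        intro m hm
        rw [← hset, List.drop_set_of_lt (by omega)]
      rw [h1]
      rw [h2 (min n (k + 1 + ws.length)) (by omega)]
      have e : k + 1 + ws.length = k + (ws.length + 1) := by omega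
      rw [e]
      simp

-- With an empty buffer B's fold does nothing (set on [] is []).
theorem pv_fold_nil_buf (f : String → Int) (limit : Int) (l : List (Int × String)) :
    l.foldl (fun b iw => if iw.1 ≥ limit then b else b.set iw.1.toNat (f iw.2)) [] = [] := by
  induction l with
  | nil => rfl
  | cons x l ih =>
    simp only [List.foldl_cons]
    split <;> simpa using ih

-- Both ports, under 0 ≤ limit_size, equal take ++ zero-padding of the mapped word list.
theorem pv_A_eq_B (sentence : String) (m : List (String × Int)) (limit : Int)
    (hl : 0 ≤ limit) :
    convert_text_to_token sentence m limit = convert_text_to_token_alt sentence m limit := by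
  unfold convert_text_to_token convert_text_to_token_alt
  set unk : Int := (m.lookup "<unk>").getD 0 with hunk
  set ws : List String := PySem.Str.split₀ (PySem.Str.lower sentence) with hws
  set f : String → Int := fun word => (m.lookup word).getD unk with hf
  set n : Nat := limit.toNat with hn
  have hcast : limit = (n : Int) := by omega
  rw [hcast]
  have hB := pv_foldB f n ws 0 (List.replicate n 0) (by simp)
  norm_num at hB
  rw [hB]
  simp only [← hf]
  by_cases h : ((ws.map f).length : Int) < (n : Int)
  · rw [if_pos h]
    have hlt : (ws.map f).length < n := by exact_mod_cast h
    rw [List.take_of_length_le (by omega)]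
    have : ((n : Int) - ((ws.map f).length : Int)).toNat = n - (ws.map f).length := by omega
    rw [this]
    have : n - min n ws.length = n - (ws.map f).length := by simp at hlt ⊢; omega
    rw [this]
  · rw [if_neg h]
    have hge : n ≤ (ws.map f).length := by exact_mod_cast not_lt.mp h
    rw [PySem.List.slice_to (ws.map f) (by omega : (0:Int) ≤ (n:Int))]
    have : n - min n ws.length = 0 := by simp at hge ⊢; omega
    rw [this, Int.toNat_natCast]
    simp

-- ===== VERDICT (by name: the statement is the Claim_ definition above) =====
-- With limit_size < 0 and at most -limit_size words, both ports return [].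
theorem pv_A_eq_B_neg (sentence : String) (m : List (String × Int)) (limit : Int)
    (hl : limit < 0)
    (hw : ((PySem.Str.split₀ (PySem.Str.lower sentence)).length : Int) ≤ -limit) :
    convert_text_to_token sentence m limit = convert_text_to_token_alt sentence m limit := by
  unfold convert_text_to_token convert_text_to_token_alt
  set ws : List String := PySem.Str.split₀ (PySem.Str.lower sentence) with hws
  have hrep : limit.toNat = 0 := by omega
  simp only [hrep, List.replicate_zero]
  rw [pv_fold_nil_buf (fun w => (m.lookup w).getD ((m.lookup "<unk>").getD 0)) limit]
  rw [if_neg (by simp; omega)]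
  set k : Nat := (-limit).toNat with hk
  have hlim : limit = -(k : Int) := by omega
  rw [hlim, PySem.List.slice_to_neg_natCast _ k (by omega)]
  simp only [List.length_map]
  rw [Nat.sub_eq_zero_of_le (by omega), List.take_zero]

theorem convert_text_to_token_spec : Claim_equal_convert_text_to_token := by
  intro sentence m limit _ hpre
  unfold Spec_convert_text_to_token
  unfold Pre_convert_text_to_token at hpre
  rcases hpre.1 with h | h
  · exact pv_A_eq_B sentence m limit h
  · by_cases h0 : 0 ≤ limit
    · exact pv_A_eq_B sentence m limit h0
    · exact pv_A_eq_B_neg sentence m limit (by omega) h
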